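-- pv_equiv track=rewrite | github.com/IceCWiener/Polynominterpolation | utility.py | check_for_duplicate_x_values
-- ===== SOURCE A (Python) =====
-- def check_for_duplicate_x_values(xy_values) -> bool:
--     if len(xy_values) < 2:
--         return False
--
--     for i in range(1, len(xy_values)):
--         if xy_values[i-1][0] == xy_values[i][0]:
--             return True
--         else:
--             return False
--
--     return False
-- ===== SOURCE B (Python) =====
-- def check_for_duplicate_x_values(xy_values) -> bool:
--     return any(a[0] == b[0] for a, b in zip(xy_values, xy_values[1:]))
-- ===== Notes on version B (the rewrite author's own statement) =====
-- stated objective: simpler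
-- what changed: Replaces the index loop with its buggy unconditional first-iteration return by a single any() over the list zipped with its own tail, so every adjacent pair is checked.
-- intended difference: On lists of length >= 3 whose first two x-values differ but which contain a duplicate adjacent x-pair later, A returns False (its loop body returns on the first iteration either way, so only the first pair is ever compared) while B returns True, which is what a duplicate-x check is meant to report. — e.g. on check_for_duplicate_x_values([(0, 0), (1, 0), (1, 0)]): A returns false, B returns true
import Mathlib
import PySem

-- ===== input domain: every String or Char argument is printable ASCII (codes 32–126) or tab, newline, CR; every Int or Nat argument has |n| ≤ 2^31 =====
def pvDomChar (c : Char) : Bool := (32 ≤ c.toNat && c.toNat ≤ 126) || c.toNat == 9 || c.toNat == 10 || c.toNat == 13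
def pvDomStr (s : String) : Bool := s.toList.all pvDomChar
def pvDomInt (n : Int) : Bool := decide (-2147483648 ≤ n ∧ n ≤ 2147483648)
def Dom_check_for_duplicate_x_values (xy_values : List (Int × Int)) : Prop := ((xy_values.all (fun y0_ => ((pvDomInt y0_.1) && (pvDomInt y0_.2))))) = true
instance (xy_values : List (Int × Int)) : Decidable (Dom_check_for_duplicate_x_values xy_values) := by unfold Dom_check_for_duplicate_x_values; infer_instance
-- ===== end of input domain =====

-- B replaces A's index loop (whose body returns on the first iteration either way, so only the
-- first adjacent pair is ever compared) by one any() over the list zipped with its tail,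
-- checking every adjacent pair — simpler, and the intended duplicate check.

-- ===== PORT A =====
-- the for loop: body of the first iteration returns True or False unconditionally
def pvLoopA (xy : List (Int × Int)) : List Int → Bool
  | [] => false
  | i :: _ =>
    if (PySem.List.pyGetD xy (i - 1) (0, 0)).1 == (PySem.List.pyGetD xy i (0, 0)).1 then true
    else false

def check_for_duplicate_x_values (xy_values : List (Int × Int)) : Bool :=
  if xy_values.length < 2 then false
  else pvLoopA xy_values (PySem.List.pyRange 1 xy_values.length 1)

-- ===== PORT B =====
def check_for_duplicate_x_values_alt (xy_values : List (Int × Int)) : Bool :=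
  (xy_values.zip (PySem.List.slice xy_values (some 1) none)).any (fun p => p.1.1 == p.2.1)

-- ===== PRECONDITION & SPEC =====
-- On lists of length ≥ 3 whose first two x-values differ but which contain a duplicate adjacent
-- x-pair later, A returns False (buggy early return) while B returns True, the intended value.
def D_check_for_duplicate_x_values (xy_values : List (Int × Int)) : Prop :=
  match xy_values with
  | a :: b :: rest => a.1 ≠ b.1 ∧ ∃ p ∈ (b :: rest).zip rest, p.1.1 = p.2.1
  | _ => False
instance (xy_values : List (Int × Int)) : Decidable (D_check_for_duplicate_x_values xy_values) := by
  unfold D_check_for_duplicate_x_values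
  cases xy_values with
  | nil => infer_instance
  | cons a t => cases t <;> infer_instance

def Spec_check_for_duplicate_x_values (xy_values : List (Int × Int)) (out : Bool) : Prop :=
  ¬ D_check_for_duplicate_x_values xy_values → out = check_for_duplicate_x_values_alt xy_values
instance (xy_values : List (Int × Int)) (out : Bool) : Decidable (Spec_check_for_duplicate_x_values xy_values out) := by
  unfold Spec_check_for_duplicate_x_values; infer_instance

def pvDiffWitness_check_for_duplicate_x_values : (List (Int × Int)) := [(0, 0), (1, 0), (1, 0)]
def pvDiffWitnessOut_check_for_duplicate_x_values : Bool × Bool := (false, true)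

-- ===== CLAIM (what is proved, stated in full; the proofs are below) =====
def Claim_unchanged_check_for_duplicate_x_values : Prop := ∀ (xy_values : List (Int × Int)), Dom_check_for_duplicate_x_values xy_values → Spec_check_for_duplicate_x_values xy_values (check_for_duplicate_x_values xy_values)
def Claim_changed_check_for_duplicate_x_values : Prop := Dom_check_for_duplicate_x_values (pvDiffWitness_check_for_duplicate_x_values) ∧ D_check_for_duplicate_x_values (pvDiffWitness_check_for_duplicate_x_values) ∧ check_for_duplicate_x_values (pvDiffWitness_check_for_duplicate_x_values) = pvDiffWitnessOut_check_for_duplicate_x_values.1 ∧ check_for_duplicate_x_values_alt (pvDiffWitness_check_for_duplicate_x_values) = pvDiffWitnessOut_check_for_duplicate_x_values.2 ∧ pvDiffWitnessOut_check_for_duplicate_x_values.1 ≠ pvDiffWitnessOut_check_for_duplicate_x_values.2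
def Claim_exact_check_for_duplicate_x_values : Prop := ∀ (xy_values : List (Int × Int)), Dom_check_for_duplicate_x_values xy_values → D_check_for_duplicate_x_values xy_values → check_for_duplicate_x_values xy_values ≠ check_for_duplicate_x_values_alt xy_values

-- ===== LEMMAS AND PROOFS =====

-- A on a list of length ≥ 2 compares only the first two x-values
theorem pvA_cons (a b : Int × Int) (rest : List (Int × Int)) :
    check_for_duplicate_x_values (a :: b :: rest) = (a.1 == b.1) := by
  unfold check_for_duplicate_x_values
  rw [if_neg (by simp)]
  rw [PySem.List.pyRange_one_cons (by simp)]
  unfold pvLoopA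
  norm_num [PySem.List.pyGetD_zero_cons, PySem.List.pyGetD_ofNat']
  rfl

-- B on a list of length ≥ 2 is the first comparison or-ed with the remaining adjacent comparisons
theorem pvB_cons (a b : Int × Int) (rest : List (Int × Int)) :
    check_for_duplicate_x_values_alt (a :: b :: rest)
      = ((a.1 == b.1) || ((b :: rest).zip rest).any (fun p => p.1.1 == p.2.1)) := by
  unfold check_for_duplicate_x_values_alt
  rw [PySem.List.slice_from_one]
  simp

theorem check_for_duplicate_x_values_spec : Claim_unchanged_check_for_duplicate_x_values := by
  intro xy _
  unfold Spec_check_for_duplicate_x_values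
  intro hnd
  match xy with
  | [] => rfl
  | [a] => rfl
  | a :: b :: rest =>
    rw [pvA_cons, pvB_cons]
    by_cases hab : a.1 = b.1
    · simp [hab]
    · have : ¬ ∃ p ∈ (b :: rest).zip rest, p.1.1 = p.2.1 := by
        intro h
        exact hnd (by exact ⟨hab, h⟩)
      have hz : ((b :: rest).zip rest).any (fun p => p.1.1 == p.2.1) = false := by
        rw [List.any_eq_false]
        intro p hp
        simp only [beq_iff_eq]
        exact fun he => this ⟨p, hp, he⟩
      simp [hz]

-- ===== VERDICT (by name: the statement is the Claim_ definition above) =====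

theorem check_for_duplicate_x_values_changed : Claim_changed_check_for_duplicate_x_values := by
  unfold Claim_changed_check_for_duplicate_x_values; decide

theorem check_for_duplicate_x_values_tight : Claim_exact_check_for_duplicate_x_values := by
  intro xy _ hd
  match xy with
  | [] => exact absurd hd (by simp [D_check_for_duplicate_x_values])
  | [a] => exact absurd hd (by simp [D_check_for_duplicate_x_values])
  | a :: b :: rest =>
    obtain ⟨hab, hex⟩ := hd
    rw [pvA_cons, pvB_cons]
    have : ((b :: rest).zip rest).any (fun p => p.1.1 == p.2.1) = true := by
      simpa [List.any_eq_true] using hex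
    simp [this, hab]
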